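-- pv_equiv track=rewrite | github.com/vumarvinevorasousa/Local-Optima-in-the-HP-Protein-Model | simple_hill.py | calc_free_energy_with_coords
-- ===== SOURCE A (Python) =====
-- def calc_free_energy_with_coords(protein, coords):
--     free_energy = 0
--     i = 0
--     while i < len(protein):
--         if protein[i] == "H":
--             j = i + 1
--             while j < len(protein):
--                 if protein[j] == "H":
--                     if (((coords[i][0] + 1 == coords[j][0] or coords[i][0] - 1 == coords[j][0]) and coords[i][1] == coords[j][1]
--                         or (coords[i][1] + 1 == coords[j][1] or coords[i][1] - 1 == coords[j][1]) and coords[i][0] == coords[j][0])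
--                         and not (abs(i - j) == 1)):
--                         free_energy -= 1
--                 j += 1
--         i += 1
--
--     return free_energy
-- ===== SOURCE B (Python) =====
-- def calc_free_energy_with_coords(protein, coords):
--     n = len(protein)
--     # pair (coordinate, index) for every H residue, then index them by coordinate
--     hs = [(coords[i], i) for i in range(n) if protein[i] == "H"]
--     occ = {}
--     for c, i in hs:
--         occ.setdefault(c, []).append(i)
--     energy = 0
--     for c, i in hs:
--         x, y = c
--         for nb in ((x + 1, y), (x - 1, y), (x, y + 1), (x, y - 1)):
--             for j in occ.get(nb, ()):
--                 if j > i and j != i + 1: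
--                     energy -= 1
--     return energy
-- ===== Notes on version B (the rewrite author's own statement) =====
-- stated objective: faster
-- what changed: B replaces A's O(n^2) all-pairs double loop over the protein with a single pass that indexes H residues in a dict keyed by coordinate and then, for each H residue, looks up only its 4 grid neighbors in O(1).
-- outside the precondition, e.g. on calc_free_energy_with_coords('H', []): A returns 0, B raises IndexError
import Mathlib
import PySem

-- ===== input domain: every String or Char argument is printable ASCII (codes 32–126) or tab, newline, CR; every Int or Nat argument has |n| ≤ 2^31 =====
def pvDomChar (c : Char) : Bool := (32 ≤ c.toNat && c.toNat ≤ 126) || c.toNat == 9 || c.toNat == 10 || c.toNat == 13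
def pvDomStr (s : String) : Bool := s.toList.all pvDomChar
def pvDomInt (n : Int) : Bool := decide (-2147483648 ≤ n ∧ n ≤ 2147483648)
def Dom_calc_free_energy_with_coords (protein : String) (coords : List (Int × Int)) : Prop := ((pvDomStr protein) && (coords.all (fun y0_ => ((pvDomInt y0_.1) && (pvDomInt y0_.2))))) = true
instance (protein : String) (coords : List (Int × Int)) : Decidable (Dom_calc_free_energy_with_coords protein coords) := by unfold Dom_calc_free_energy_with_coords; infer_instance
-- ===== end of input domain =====

-- B indexes H residues by coordinate in a dict and checks only the 4 grid neighbors of each H,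
-- replacing A's all-pairs double loop (measured faster, asymptotic change).


-- ===== PORT A =====
-- A's adjacency test, exactly as the Python condition groups (Python and/or precedence)
def pvAdj (ci cj : Int × Int) : Bool :=
  ((ci.1 + 1 == cj.1 || ci.1 - 1 == cj.1) && ci.2 == cj.2)
  || ((ci.2 + 1 == cj.2 || ci.2 - 1 == cj.2) && ci.1 == cj.1)

-- the Boolean the inner loop body tests for the pair (i, j), exactly Python's condition
def pvGoodB (s : List Char) (cs : List (Int × Int)) (i j : Nat) : Bool :=
  s.getD j ' ' == 'H' &&
    (pvAdj (cs.getD i (0, 0)) (cs.getD j (0, 0)) && !(((i : Int) - (j : Int)).natAbs == 1))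

-- inner 'while j < len(protein)' loop (coords accesses via getD: in range under Pre_)
def pvA_inner (s : List Char) (cs : List (Int × Int)) (n i : Nat) (j : Nat) (fe : Int) : Int :=
  if j < n then
    pvA_inner s cs n i (j + 1) (if pvGoodB s cs i j then fe - 1 else fe)
  else fe
termination_by n - j

-- outer 'while i < len(protein)' loop
def pvA_outer (s : List Char) (cs : List (Int × Int)) (n : Nat) (i : Nat) (fe : Int) : Int :=
  if i < n then
    pvA_outer s cs n (i + 1)
      (if s.getD i ' ' == 'H' then pvA_inner s cs n i (i + 1) fe else fe)
  else fe
termination_by n - i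

def calc_free_energy_with_coords (protein : String) (coords : List (Int × Int)) : Int :=
  pvA_outer protein.toList coords protein.toList.length 0 0

-- ===== PORT B =====
-- the 4 grid neighbors of a coordinate
def pvNbs (c : Int × Int) : List (Int × Int) :=
  [(c.1 + 1, c.2), (c.1 - 1, c.2), (c.1, c.2 + 1), (c.1, c.2 - 1)]

-- hs = [(coords[i], i) for i in range(n) if protein[i] == "H"]
def pvHs (s : List Char) (cs : List (Int × Int)) (n : Nat) : List ((Int × Int) × Int) :=
  ((List.range n).filter (fun i => s.getD i ' ' == 'H')).map (fun i => (cs.getD i (0, 0), (i : Int)))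

def calc_free_energy_with_coords_alt (protein : String) (coords : List (Int × Int)) : Int :=
  let s := protein.toList
  let n := s.length
  let hs := pvHs s coords n
  let occ := hs.foldl (fun d p => d.modify p.1 [] (· ++ [p.2])) PySem.Dict.empty
  hs.foldl (fun e p =>
    (pvNbs p.1).foldl (fun e nb =>
      (occ.getD nb []).foldl (fun e j => if p.2 < j && j != p.2 + 1 then e - 1 else e) e) e) 0

-- ===== PRECONDITION & SPEC =====
-- Pre_ excludes inputs where some 'H' residue has no coordinate (index ≥ len(coords)): there A
-- raises IndexError whenever a second H exists, and B always raises (it indexes every H's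
-- coordinate, while A happens to return 0 when the out-of-range H has no partner).
def Pre_calc_free_energy_with_coords (protein : String) (coords : List (Int × Int)) : Prop :=
  ∀ i < protein.toList.length, protein.toList.getD i ' ' = 'H' → i < coords.length
instance (protein : String) (coords : List (Int × Int)) : Decidable (Pre_calc_free_energy_with_coords protein coords) := by unfold Pre_calc_free_energy_with_coords; infer_instance

def pvWitness_calc_free_energy_with_coords : String × (List (Int × Int)) :=
  ("HPPH", [(0, 0), (1, 0), (1, 1), (0, 1)])

def Spec_calc_free_energy_with_coords (protein : String) (coords : List (Int × Int)) (out : Int) : Prop := out = calc_free_energy_with_coords_alt protein coords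
instance (protein : String) (coords : List (Int × Int)) (out : Int) : Decidable (Spec_calc_free_energy_with_coords protein coords out) := by unfold Spec_calc_free_energy_with_coords; infer_instance

-- ===== CLAIM (what is proved, stated in full; the proofs are below) =====
def Claim_equal_calc_free_energy_with_coords : Prop := ∀ (protein : String) (coords : List (Int × Int)), Dom_calc_free_energy_with_coords protein coords → Pre_calc_free_energy_with_coords protein coords → Spec_calc_free_energy_with_coords protein coords (calc_free_energy_with_coords protein coords)

-- ===== LEMMAS AND PROOFS =====

lemma pv_foldl_sub_count {α : Type} (p : α → Bool) :
    ∀ (l : List α) (e : Int),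
      l.foldl (fun e x => if p x then e - 1 else e) e = e - l.countP p := by
  intro l
  induction l with
  | nil => intro e; simp
  | cons a t ih =>
      intro e
      simp only [List.foldl_cons, List.countP_cons, ih]
      by_cases h : p a = true <;> simp [h] <;> omega

lemma pv_foldl_shift {α : Type} (step : Int → α → Int) (f : α → Int) :
    ∀ (l : List α), (∀ x ∈ l, ∀ e, step e x = e - f x) → ∀ (e : Int),
      l.foldl step e = e - (l.map f).sum := by
  intro l
  induction l with
  | nil => intro _ e; simp
  | cons a t ih =>
      intro h e
      simp only [List.foldl_cons, List.map_cons, List.sum_cons]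
      rw [h a (by simp), ih (fun x hx e => h x (by simp [hx]) e)]
      ring

def pvCntA (s : List Char) (cs : List (Int × Int)) (n i : Nat) : Nat :=
  (List.range' (i + 1) (n - (i + 1))).countP (pvGoodB s cs i)

lemma pvA_inner_eq (s : List Char) (cs : List (Int × Int)) (n i : Nat) (j : Nat) (fe : Int) :
    pvA_inner s cs n i j fe = fe - ((List.range' j (n - j)).countP (pvGoodB s cs i) : Int) := by
  rw [pvA_inner]
  split
  next h =>
    have hn : n - j = (n - (j + 1)) + 1 := by omega
    rw [hn, List.range'_succ, pvA_inner_eq s cs n i (j + 1), List.countP_cons]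
    rcases Bool.eq_false_or_eq_true (pvGoodB s cs i j) with hg | hg <;>
      simp only [hg, Bool.false_eq_true, if_true, if_false] <;> push_cast <;> ring
  next h =>
    have hz : n - j = 0 := by omega
    simp [hz]
termination_by n - j

lemma pvA_outer_eq (s : List Char) (cs : List (Int × Int)) (n : Nat) (i : Nat) (fe : Int) :
    pvA_outer s cs n i fe = fe -
      ((List.range' i (n - i)).map
        (fun i' => if s.getD i' ' ' == 'H' then (pvCntA s cs n i' : Int) else 0)).sum := by
  rw [pvA_outer]
  split
  next h =>
    have hn : n - i = (n - (i + 1)) + 1 := by omega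
    rw [hn, List.range'_succ, pvA_outer_eq s cs n (i + 1), pvA_inner_eq s cs n i (i + 1) fe]
    simp only [List.map_cons, List.sum_cons, pvCntA]
    rcases Bool.eq_false_or_eq_true (s.getD i ' ' == 'H') with hH | hH <;>
      simp only [hH, Bool.false_eq_true, if_true, if_false] <;> ring
  next h =>
    have hz : n - i = 0 := by omega
    simp [hz]
termination_by n - i

lemma pv_sum_if_filter (P : Nat → Bool) (v : Nat → Int) :
    ∀ l : List Nat,
      (l.map (fun i => if P i then v i else 0)).sum = ((l.filter P).map v).sum := by
  intro l
  induction l with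
  | nil => simp
  | cons a t ih =>
      by_cases h : P a = true <;> simp [h, ih]

-- occ characterization: lookups return exactly the H indices carrying that coordinate, in order
lemma pv_occ_getD (s : List Char) (cs : List (Int × Int)) (n : Nat) (nb : Int × Int) :
    ((pvHs s cs n).foldl (fun d p => d.modify p.1 [] (· ++ [p.2])) PySem.Dict.empty).getD nb []
      = (((List.range n).filter
            (fun i => (s.getD i ' ' == 'H') && (cs.getD i (0, 0) == nb))).map
          (fun i => Int.ofNat i)) := by
  rw [PySem.Dict.getD_foldl_modify_append]
  simp [pvHs, List.filter_map, Function.comp_def, List.filter_filter, Bool.and_comm]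

-- A's adjacency test = membership in the 4-neighbor list
lemma pv_adj_eq (ci cj : Int × Int) :
    pvAdj ci cj = ((cj == (ci.1 + 1, ci.2)) || ((cj == (ci.1 - 1, ci.2)) ||
      ((cj == (ci.1, ci.2 + 1)) || (cj == (ci.1, ci.2 - 1))))) := by
  rcases ci with ⟨x, y⟩
  rcases cj with ⟨a, b⟩
  rw [Bool.eq_iff_iff]
  simp [pvAdj, Prod.ext_iff]
  omega

-- the Nat predicate produced by B's lookup for residue i and neighbor nb
def pvPred (s : List Char) (cs : List (Int × Int)) (i : Nat) (nb : Int × Int) (j : Nat) : Bool :=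
  (decide ((i : Int) < (j : Int)) && ((j : Int) != (i : Int) + 1)) &&
    ((s.getD j ' ' == 'H') && (cs.getD j (0, 0) == nb))

lemma pv_sum_cast {α : Type} (f : α → Nat) :
    ∀ l : List α, (l.map (fun x => (f x : Int))).sum = ((l.map f).sum : Int) := by
  intro l
  induction l with
  | nil => simp
  | cons a t ih => simp [ih]

-- per-element: the four neighbor indicators add up to A's pair indicator (for j > i)
lemma pv_elem (s : List Char) (cs : List (Int × Int)) (i j : Nat) (hij : i < j) :
    ((if pvPred s cs i ((cs.getD i (0, 0)).1 + 1, (cs.getD i (0, 0)).2) j then 1 else 0) +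
     ((if pvPred s cs i ((cs.getD i (0, 0)).1 - 1, (cs.getD i (0, 0)).2) j then 1 else 0) +
      ((if pvPred s cs i ((cs.getD i (0, 0)).1, (cs.getD i (0, 0)).2 + 1) j then 1 else 0) +
       (if pvPred s cs i ((cs.getD i (0, 0)).1, (cs.getD i (0, 0)).2 - 1) j then 1 else 0))))
      = (if pvGoodB s cs i j then 1 else 0) := by
  rcases Bool.eq_false_or_eq_true (s.getD j ' ' == 'H') with hH | hH
  · simp only [pvPred, pvGoodB, pv_adj_eq, hH, Bool.true_and]
    rcases hci : cs.getD i (0, 0) with ⟨x, y⟩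
    rcases hcj : cs.getD j (0, 0) with ⟨a, b⟩
    simp only [hci, Prod.ext_iff, beq_iff_eq, bne_iff_ne, Bool.and_eq_true, Bool.or_eq_true,
      Bool.not_eq_true', beq_eq_false_iff_ne, decide_eq_true_eq, ne_eq]
    split_ifs <;> omega
  · have hH' : ¬ (s[j]?.getD ' ' = 'H') := by simpa using hH
    simp [pvPred, pvGoodB, hH']

-- summed over a list of indices all beyond i
lemma pv_key (s : List Char) (cs : List (Int × Int)) (i : Nat) :
    ∀ l : List Nat, (∀ j ∈ l, i < j) →
      (l.countP (pvPred s cs i ((cs.getD i (0, 0)).1 + 1, (cs.getD i (0, 0)).2)) +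
       (l.countP (pvPred s cs i ((cs.getD i (0, 0)).1 - 1, (cs.getD i (0, 0)).2)) +
        (l.countP (pvPred s cs i ((cs.getD i (0, 0)).1, (cs.getD i (0, 0)).2 + 1)) +
         l.countP (pvPred s cs i ((cs.getD i (0, 0)).1, (cs.getD i (0, 0)).2 - 1)))))
        = l.countP (pvGoodB s cs i) := by
  intro l
  induction l with
  | nil => intro _; simp
  | cons a t ih =>
      intro h
      simp only [List.countP_cons]
      have he := pv_elem s cs i a (h a (List.mem_cons_self))
      have ht := ih (fun j hj => h j (List.mem_cons_of_mem _ hj))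
      omega

-- per-H-residue count: the 4 neighbor lookups together count exactly A's inner loop
lemma pv_per_H (s : List Char) (cs : List (Int × Int)) (n : Nat) (i : Nat) (hi : i < n) :
    (((pvNbs (cs.getD i (0, 0))).map
        (fun nb => (List.range n).countP (pvPred s cs i nb))).sum)
      = pvCntA s cs n i := by
  have hsplit : List.range n = List.range' 0 (i + 1) ++ List.range' (i + 1) (n - (i + 1)) := by
    have h := List.range'_append_1 (s := 0) (m := i + 1) (n := n - (i + 1))
    simp only [Nat.zero_add] at h
    rw [show (i + 1) + (n - (i + 1)) = n from by omega] at h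
    rw [List.range_eq_range', ← h]
  have hzero : ∀ nb : Int × Int, (List.range' 0 (i + 1)).countP (pvPred s cs i nb) = 0 := by
    intro nb
    rw [List.countP_eq_zero]
    intro j hj
    have hjlt : j < i + 1 := by
      have := List.mem_range'_1.mp hj
      omega
    simp only [pvPred, Bool.and_eq_true, decide_eq_true_eq]
    intro hcon
    have := hcon.1.1
    omega
  have hbig : ∀ j ∈ List.range' (i + 1) (n - (i + 1)), i < j := by
    intro j hj
    have := List.mem_range'_1.mp hj
    omega
  simp only [pvNbs, List.map_cons, List.map_nil, List.sum_cons, List.sum_nil, add_zero]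
  simp only [hsplit, List.countP_append, hzero, Nat.zero_add]
  rw [pvCntA]
  exact pv_key s cs i _ hbig

theorem pv_main (protein : String) (coords : List (Int × Int)) :
    calc_free_energy_with_coords protein coords
      = calc_free_energy_with_coords_alt protein coords := by
  simp only [calc_free_energy_with_coords, calc_free_energy_with_coords_alt]
  generalize protein.toList = s
  generalize coords = cs
  have hstep : ∀ p ∈ pvHs s cs s.length, ∀ e : Int,
      (pvNbs p.1).foldl (fun e nb =>
        (((pvHs s cs s.length).foldl (fun d p => d.modify p.1 [] (· ++ [p.2]))
            PySem.Dict.empty).getD nb []).foldl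
          (fun e j => if p.2 < j && j != p.2 + 1 then e - 1 else e) e) e
        = e - ((pvNbs p.1).map (fun nb =>
            ((((pvHs s cs s.length).foldl (fun d p => d.modify p.1 [] (· ++ [p.2]))
                PySem.Dict.empty).getD nb []).countP
              (fun j => p.2 < j && j != p.2 + 1) : Int))).sum := by
    intro p _ e
    exact pv_foldl_shift _ _ _
      (fun nb _ e => pv_foldl_sub_count (fun j => p.2 < j && j != p.2 + 1)
        (((pvHs s cs s.length).foldl (fun d p => d.modify p.1 [] (· ++ [p.2]))
            PySem.Dict.empty).getD nb []) e) e
  rw [pv_foldl_shift _ _ (pvHs s cs s.length) hstep 0, pvA_outer_eq]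
  congr 1
  rw [Nat.sub_zero, ← List.range_eq_range', pv_sum_if_filter]
  simp only [pv_occ_getD]
  simp only [pvHs, List.map_map]
  apply congrArg
  apply List.map_congr_left
  intro i hi
  have hmem := List.mem_filter.mp hi
  have hilt : i < s.length := List.mem_range.mp hmem.1
  simp only [Function.comp_def, List.countP_map, List.countP_filter]
  show (pvCntA s cs s.length i : Int)
      = (List.map (fun nb => ((List.range s.length).countP (pvPred s cs i nb) : Int))
          (pvNbs (cs.getD i (0, 0)))).sum
  rw [pv_sum_cast, pv_per_H s cs s.length i hilt]

-- ===== VERDICT (by name: the statement is the Claim_ definition above) =====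
theorem calc_free_energy_with_coords_spec : Claim_equal_calc_free_energy_with_coords := by
  intro protein coords _ _
  exact pv_main protein coords
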